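-- pv_equiv track=rewrite | github.com/var-cirkonivich/Dinocolumba_message_transfer | v-2.0.0/Dinocolumba_commcode_Ⅰ/Dinocolumba_commcode.py | sum_unicode
-- ===== SOURCE A (Python) =====
-- def sum_unicode(string):
--     total = 0
--     for char in string:
--         total += ord(char)
--     while True:
--         if total <= 9:
--             break
--         total -= 9
--     return total
-- ===== SOURCE B (Python) =====
-- def sum_unicode(string):
--     total = sum(map(ord, string))
--     return total if total <= 9 else total - 9 * ((total - 1) // 9)
-- ===== Notes on version B (the rewrite author's own statement) =====
-- stated objective: faster
-- what changed: Replace the subtract-9-until-<=9 loop with a closed-form floor-division reduction total - 9*((total-1)//9), computed after a single sum over the string.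
import Mathlib
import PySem

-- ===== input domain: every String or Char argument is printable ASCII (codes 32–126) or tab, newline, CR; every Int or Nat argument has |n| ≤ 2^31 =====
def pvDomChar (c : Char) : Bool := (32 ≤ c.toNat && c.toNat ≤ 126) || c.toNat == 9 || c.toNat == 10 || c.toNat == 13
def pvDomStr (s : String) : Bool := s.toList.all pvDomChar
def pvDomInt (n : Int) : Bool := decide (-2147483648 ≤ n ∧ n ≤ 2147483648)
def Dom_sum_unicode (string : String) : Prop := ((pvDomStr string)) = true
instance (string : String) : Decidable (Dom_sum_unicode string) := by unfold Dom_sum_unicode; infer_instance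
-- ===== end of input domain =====

-- B replaces A's subtract-9-until-≤9 loop with a closed-form floor-division reduction (faster: O(n) vs O(n + total/9)).

-- ===== PORT A =====
-- A's while loop: subtract 9 until total ≤ 9 (total is always ≥ 0 here, but the
-- recursion is total for any Int since (t-9).toNat < t.toNat when t > 9).
def pvRed (t : Int) : Int :=
  if h : t ≤ 9 then t else pvRed (t - 9)
  termination_by t.toNat
  decreasing_by simp at h; omega

def sum_unicode (string : String) : Int :=
  pvRed (string.toList.foldl (fun total char => total + (char.toNat : Int)) 0)

-- ===== PORT B =====
def sum_unicode_alt (string : String) : Int :=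
  let total : Int := (string.toList.map (fun c => (c.toNat : Int))).sum
  if total ≤ 9 then total else total - 9 * PySem.Int.floordiv (total - 1) 9

-- ===== PRECONDITION & SPEC =====
def Spec_sum_unicode (string : String) (out : Int) : Prop := out = sum_unicode_alt string
instance (string : String) (out : Int) : Decidable (Spec_sum_unicode string out) := by unfold Spec_sum_unicode; infer_instance

-- ===== CLAIM (what is proved, stated in full; the proofs are below) =====
def Claim_equal_sum_unicode : Prop := ∀ (string : String), Dom_sum_unicode string → Spec_sum_unicode string (sum_unicode string)

-- ===== LEMMAS AND PROOFS =====

-- A's loop equals the closed form for nonnegative totals.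
theorem pvRed_closed (t : Int) (ht : 0 ≤ t) :
    pvRed t = if t ≤ 9 then t else t - 9 * PySem.Int.floordiv (t - 1) 9 := by
  induction t using pvRed.induct with
  | case1 t h => rw [pvRed]; simp [h]
  | case2 t h ih =>
    rw [pvRed, dif_neg h, ih (by omega), if_neg h]
    have hf1 : PySem.Int.floordiv (t - 9 - 1) 9 = (t - 9 - 1) / 9 :=
      PySem.Int.floordiv_eq_ediv_of_pos (by norm_num)
    have hf2 : PySem.Int.floordiv (t - 1) 9 = (t - 1) / 9 :=
      PySem.Int.floordiv_eq_ediv_of_pos (by norm_num)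
    rw [hf2]
    split_ifs with h2
    · omega
    · rw [hf1]; omega

theorem foldl_eq_sum_map (l : List Char) (a : Int) :
    l.foldl (fun total char => total + (char.toNat : Int)) a
      = a + (l.map (fun c => (c.toNat : Int))).sum := by
  induction l generalizing a with
  | nil => simp
  | cons c l ih => simp [List.foldl, ih (a + c.toNat)]; ring

theorem sum_nonneg (l : List Char) : 0 ≤ (l.map (fun c => (c.toNat : Int))).sum := by
  induction l with
  | nil => simp
  | cons c l ih => simp only [List.map, List.sum_cons]; positivity

-- ===== VERDICT (by name: the statement is the Claim_ definition above) =====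
theorem sum_unicode_spec : Claim_equal_sum_unicode := by
  intro s _
  unfold Spec_sum_unicode sum_unicode sum_unicode_alt
  rw [foldl_eq_sum_map, zero_add, pvRed_closed _ (sum_nonneg _)]
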